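-- pv_equiv track=rewrite | github.com/rafaelhlima/mochila_unica | solver.py | algoritmo_menor_peso
-- ===== SOURCE A (Python) =====
-- from operator import itemgetter
--
-- def algoritmo_menor_peso(dados_inst, capacidade):
--     # Armazena os itens que estão na mochila
--     solucao = list()
--     # Cria uma cópia dos dados da instância (para não estragar o original)
--     dados = [linha[:] for linha in dados_inst]
--     # Ordena de forma crescente com relação ao peso
--     dados.sort(key=itemgetter(1))
--     # Coloca os itens na mochila
--     capac_usada = 0
--     valor_total = 0
--     for item in dados:
--         id_item = item[0]
--         peso_item = item[1]
--         valor_item = item[2]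
--         # Se couber na mochila, então coloca na mochila
--         if capac_usada + peso_item <= capacidade:
--             solucao.append(id_item)
--             capac_usada += peso_item
--             valor_total += valor_item
--     # Retorna a solução, o valor total e o peso total da mochila
--     return solucao, valor_total, capac_usada
-- ===== SOURCE B (Python) =====
-- def algoritmo_menor_peso(dados_inst, capacidade):
--     # Selection loop instead of sorting: repeatedly pull the lightest remaining
--     # item; stop at the first one that does not fit, since every remaining item
--     # is at least as heavy.  min() returns the first minimal item, so ties are
--     # taken in original order, exactly like a stable sort would.
--     restantes = list(dados_inst)
--     solucao = []
--     valor_total = 0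
--     capac_usada = 0
--     while restantes:
--         menor = min(restantes, key=lambda item: item[1])
--         if capac_usada + menor[1] > capacidade:
--             break
--         solucao.append(menor[0])
--         valor_total += menor[2]
--         capac_usada += menor[1]
--         restantes.remove(menor)
--     return solucao, valor_total, capac_usada
-- ===== Notes on version B (the rewrite author's own statement) =====
-- stated objective: alternative
-- what changed: Replaces sort-then-scan with a selection loop: no sort at all, the lightest remaining item is extracted with min()+remove() each round and the loop stops at the first item that does not fit (all remaining are at least as heavy); ties follow original order because min returns the first minimum, matching the stable sort.
import Mathlib
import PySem

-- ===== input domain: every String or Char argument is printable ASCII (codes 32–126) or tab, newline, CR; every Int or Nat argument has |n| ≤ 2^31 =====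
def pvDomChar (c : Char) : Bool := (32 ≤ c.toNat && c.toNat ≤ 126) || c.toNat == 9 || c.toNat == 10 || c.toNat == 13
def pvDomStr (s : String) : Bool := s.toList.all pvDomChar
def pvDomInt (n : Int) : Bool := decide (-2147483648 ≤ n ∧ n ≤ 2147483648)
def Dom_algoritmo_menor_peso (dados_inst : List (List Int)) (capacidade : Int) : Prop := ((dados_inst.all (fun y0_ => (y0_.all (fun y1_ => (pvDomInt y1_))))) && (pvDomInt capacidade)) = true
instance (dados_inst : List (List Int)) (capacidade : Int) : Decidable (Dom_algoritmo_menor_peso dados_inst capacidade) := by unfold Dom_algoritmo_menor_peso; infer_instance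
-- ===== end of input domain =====

-- B replaces A's sort-then-scan with a sortless selection loop (min + remove each
-- round, stopping at the first item that does not fit): alternative algorithm, same results.

-- ===== PORT A =====
-- Under Pre_ every row has length ≥ 3, so the pyGetD defaults are never reached.
def algoritmo_menor_peso (dados_inst : List (List Int)) (capacidade : Int) : List Int × Int × Int :=
  let dados := PySem.List.sorted dados_inst (fun linha => PySem.List.pyGetD linha 1 0) false
  let r := dados.foldl (fun (st : List Int × Int × Int) item =>
      let id_item := PySem.List.pyGetD item 0 0
      let peso_item := PySem.List.pyGetD item 1 0
      let valor_item := PySem.List.pyGetD item 2 0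
      if st.2.2 + peso_item ≤ capacidade then
        (st.1 ++ [id_item], st.2.1 + valor_item, st.2.2 + peso_item)
      else st) ([], 0, 0)
  r

-- ===== PORT B =====
-- Source B's while loop; the fuel is the list length (restantes loses one element per round).
def selLoop (capacidade : Int) : Nat → List (List Int) → List Int → Int → Int → List Int × Int × Int
  | 0, _, sol, val, used => (sol, val, used)
  | Nat.succ n, restantes, sol, val, used =>
    match PySem.List.min? restantes (fun item => PySem.List.pyGetD item 1 0) with
    | none => (sol, val, used)
    | some menor =>
      if capacidade < used + PySem.List.pyGetD menor 1 0 then (sol, val, used)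
      else selLoop capacidade n ((PySem.List.remove? restantes menor).getD restantes)
            (sol ++ [PySem.List.pyGetD menor 0 0])
            (val + PySem.List.pyGetD menor 2 0)
            (used + PySem.List.pyGetD menor 1 0)

def algoritmo_menor_peso_alt (dados_inst : List (List Int)) (capacidade : Int) : List Int × Int × Int :=
  selLoop capacidade dados_inst.length dados_inst [] 0 0

-- ===== PRECONDITION & SPEC =====
-- Pre_ excludes rows shorter than 3 entries: on every such input A raises IndexError
-- (in the sort key or at item[2], which it reads unconditionally), so no value is claimed there.
def Pre_algoritmo_menor_peso (dados_inst : List (List Int)) (capacidade : Int) : Prop :=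
  ∀ linha ∈ dados_inst, 3 ≤ linha.length
instance (dados_inst : List (List Int)) (capacidade : Int) : Decidable (Pre_algoritmo_menor_peso dados_inst capacidade) := by unfold Pre_algoritmo_menor_peso; infer_instance
def pvWitness_algoritmo_menor_peso : List (List Int) × Int := ([[1, 2, 10], [2, 1, 5], [3, 4, 7]], 5)

def Spec_algoritmo_menor_peso (dados_inst : List (List Int)) (capacidade : Int) (out : List Int × Int × Int) : Prop := out = algoritmo_menor_peso_alt dados_inst capacidade
instance (dados_inst : List (List Int)) (capacidade : Int) (out : List Int × Int × Int) : Decidable (Spec_algoritmo_menor_peso dados_inst capacidade out) := by unfold Spec_algoritmo_menor_peso; infer_instance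

-- ===== CLAIM (what is proved, stated in full; the proofs are below) =====
def Claim_equal_algoritmo_menor_peso : Prop := ∀ (dados_inst : List (List Int)) (capacidade : Int), Dom_algoritmo_menor_peso dados_inst capacidade → Pre_algoritmo_menor_peso dados_inst capacidade → Spec_algoritmo_menor_peso dados_inst capacidade (algoritmo_menor_peso dados_inst capacidade)

-- ===== LEMMAS AND PROOFS =====

-- min? over l ++ [x] updates min? over l with x (strict comparison: ties keep the earlier element)
lemma min?_append_singleton {α κ : Type} [LinearOrder κ] (l : List α) (x : α) (key : α → κ) :
    PySem.List.min? (l ++ [x]) key =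
      match PySem.List.min? l key with
      | none => some x
      | some m => if key x < key m then some x else some m := by
  simp only [PySem.List.min?, List.foldl_append, List.foldl_cons, List.foldl_nil]
  rfl

-- sorted over l ++ [x] inserts x into sorted l
lemma sorted_append_singleton {α κ : Type} [LinearOrder κ] (l : List α) (x : α) (key : α → κ) :
    PySem.List.sorted (l ++ [x]) key false =
      PySem.List.insertBy (fun a b => decide (key a < key b)) x (PySem.List.sorted l key false) := by
  rw [PySem.List.sorted_eq_foldl_insertBy, PySem.List.sorted_eq_foldl_insertBy, List.foldl_append]
  rfl

-- the head of the stable sort is the FIRST minimal element, the tail is the sort of the rest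
lemma sorted_eq_min_cons {α κ : Type} [BEq α] [LawfulBEq α] [LinearOrder κ] (l : List α) (key : α → κ) :
    ∀ m, PySem.List.min? l key = some m →
      PySem.List.sorted l key false = m :: PySem.List.sorted (l.erase m) key false := by
  induction l using List.reverseRecOn with
  | nil => intro m hm; simp [PySem.List.min?] at hm
  | append_singleton l' x ih =>
    intro m hm
    rw [min?_append_singleton] at hm
    rw [sorted_append_singleton]
    cases hl' : PySem.List.min? l' key with
    | none =>
      have : l' = [] := (PySem.List.min?_eq_none_iff _ _).mp hl'
      subst this
      simp [PySem.List.min?] at hm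
      subst hm
      simp [PySem.List.sorted, PySem.List.insertBy]
    | some m' =>
      rw [hl'] at hm
      have hm2 : (if key x < key m' then some x else some m') = some m := hm
      have hm'mem : m' ∈ l' := PySem.List.min?_mem hl'
      have hmin : ∀ y ∈ l', key m' ≤ key y := PySem.List.min?_isMin hl'
      by_cases hlt : key x < key m'
      · rw [if_pos hlt] at hm2
        cases hm2
        have hx : x ∉ l' := fun hxl => absurd (hmin x hxl) (not_le.mpr hlt)
        rw [List.erase_append_right _ hx]
        simp only [List.erase_cons_head]
        rw [ih m' hl']
        simp [PySem.List.insertBy, hlt, ih m' hl']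
      · rw [if_neg hlt] at hm2
        cases hm2
        rw [List.erase_append_left _ hm'mem]
        rw [ih m hl', sorted_append_singleton]
        simp [PySem.List.insertBy, hlt]

-- if nothing fits any more, A's loop leaves the state unchanged
lemma loop_skip_all (cap : Int) (l : List (List Int)) (st : List Int × Int × Int)
    (h : ∀ y ∈ l, ¬ (st.2.2 + PySem.List.pyGetD y 1 0 ≤ cap)) :
    l.foldl (fun (st : List Int × Int × Int) item =>
      if st.2.2 + PySem.List.pyGetD item 1 0 ≤ cap then
        (st.1 ++ [PySem.List.pyGetD item 0 0], st.2.1 + PySem.List.pyGetD item 2 0, st.2.2 + PySem.List.pyGetD item 1 0)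
      else st) st = st := by
  induction l with
  | nil => rfl
  | cons x xs ih =>
    simp only [List.foldl_cons, if_neg (h x (by simp))]
    exact ih (fun y hy => h y (by simp [hy]))

-- A's fold over the weight-sorted list computes B's selection loop
lemma fold_sorted_eq_selLoop (cap : Int) :
    ∀ (n : Nat) (l : List (List Int)), l.length = n → ∀ (sol : List Int) (val used : Int),
    (PySem.List.sorted l (fun linha => PySem.List.pyGetD linha 1 0) false).foldl
      (fun (st : List Int × Int × Int) item =>
        if st.2.2 + PySem.List.pyGetD item 1 0 ≤ cap then
          (st.1 ++ [PySem.List.pyGetD item 0 0], st.2.1 + PySem.List.pyGetD item 2 0, st.2.2 + PySem.List.pyGetD item 1 0)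
        else st) (sol, val, used)
      = selLoop cap n l sol val used := by
  intro n
  induction n with
  | zero =>
    intro l hl sol val used
    have : l = [] := List.length_eq_zero_iff.mp hl
    subst this
    simp [selLoop, PySem.List.sorted]
  | succ n ih =>
    intro l hl sol val used
    cases hmin : PySem.List.min? l (fun linha => PySem.List.pyGetD linha 1 0) with
    | none =>
      have : l = [] := (PySem.List.min?_eq_none_iff _ _).mp hmin
      subst this; simp at hl
    | some m =>
      have hmem : m ∈ l := PySem.List.min?_mem hmin
      have hminle := PySem.List.min?_isMin hmin
      rw [sorted_eq_min_cons l _ m hmin]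
      simp only [selLoop, hmin, List.foldl_cons]
      by_cases hfit : used + PySem.List.pyGetD m 1 0 ≤ cap
      · rw [if_pos hfit, if_neg (by omega)]
        rw [PySem.List.remove?_eq_some_erase l m hmem]
        simp only [Option.getD_some]
        exact ih (l.erase m) (by rw [List.length_erase_of_mem hmem]; omega) _ _ _
      · rw [if_neg hfit, if_pos (by omega)]
        apply loop_skip_all
        intro y hy
        have hky := hminle y ((List.erase_subset) ((PySem.List.mem_sorted _ _ _ _).mp hy))
        simp only
        omega

-- ===== VERDICT (by name: the statement is the Claim_ definition above) =====
theorem algoritmo_menor_peso_spec : Claim_equal_algoritmo_menor_peso := by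
  intro dados_inst capacidade _ _
  show algoritmo_menor_peso dados_inst capacidade = algoritmo_menor_peso_alt dados_inst capacidade
  simp only [algoritmo_menor_peso, algoritmo_menor_peso_alt]
  exact fold_sorted_eq_selLoop capacidade dados_inst.length dados_inst rfl [] 0 0
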